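-- pv_equiv track=rewrite | github.com/Nghia03092004/nghia03092004.github.io | project_euler/problem_514/solution.py | canonical_form
-- ===== SOURCE A (Python) =====
-- def normalize_polygon(pts):
--     """Normalize a polygon to canonical form (translation to origin, sorted)."""
--     if not pts:
--         return tuple()
--     min_x = min(p[0] for p in pts)
--     min_y = min(p[1] for p in pts)
--     translated = tuple(sorted((p[0] - min_x, p[1] - min_y) for p in pts))
--     return translated
--
-- def rotate_90(pts, n):
--     """Rotate points 90 degrees clockwise on n x n grid."""
--     return [(p[1], n - 1 - p[0]) for p in pts]
--
-- def reflect_h(pts, n):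
--     """Reflect across horizontal axis."""
--     return [(p[0], n - 1 - p[1]) for p in pts]
--
-- def canonical_form(pts, n):
--     """Find canonical form under D4 symmetry group."""
--     forms = []
--     current = list(pts)
--     for _ in range(4):
--         forms.append(normalize_polygon(current))
--         ref = reflect_h(current, n)
--         forms.append(normalize_polygon(ref))
--         current = rotate_90(current, n)
--     return min(forms)
-- ===== SOURCE B (Python) =====
-- def _rev_runs(lst, idx):
--     """Reverse each maximal run of elements sharing coordinate idx.
--
--     On a list sorted lexicographically with coordinate idx first, this yields
--     the order 'idx ascending, other coordinate descending'."""
--     out = []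
--     i = 0
--     while i < len(lst):
--         j = i
--         while j < len(lst) and lst[j][idx] == lst[i][idx]:
--             j += 1
--         out.extend(reversed(lst[i:j]))
--         i = j
--     return out
--
--
-- def canonical_form(pts, n):
--     """Find canonical form under D4 symmetry group.
--
--     Sorts the point set only twice (by (x,y) and by (y,x)); the sorted order
--     of every one of the 8 D4 images is derived from those two presorted lists
--     by run-reversal and/or full reversal, and the translation offset of each
--     image comes from the bounding box, computed once.  Normalization is
--     translation-invariant, so the grid parameter n drops out."""
--     pts = list(pts)
--     if not pts:
--         return tuple()
--     xs = [p[0] for p in pts]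
--     ys = [p[1] for p in pts]
--     minx, maxx, miny, maxy = min(xs), max(xs), min(ys), max(ys)
--     S = sorted(pts)                                  # lex by (x, y)
--     T = sorted(pts, key=lambda p: (p[1], p[0]))      # lex by (y, x)
--     Sg = _rev_runs(S, 0)                             # order: x asc, y desc
--     Tg = _rev_runs(T, 1)                             # order: y asc, x desc
--     candidates = [
--         (S,              lambda x, y: (x, y),   minx,  miny),
--         (Sg,             lambda x, y: (x, -y),  minx,  -maxy),
--         (Tg,             lambda x, y: (y, -x),  miny,  -maxx),
--         (T,              lambda x, y: (y, x),   miny,  minx),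
--         (S[::-1],        lambda x, y: (-x, -y), -maxx, -maxy),
--         (Sg[::-1],       lambda x, y: (-x, y),  -maxx, miny),
--         (Tg[::-1],       lambda x, y: (-y, x),  -maxy, minx),
--         (T[::-1],        lambda x, y: (-y, -x), -maxy, -maxx),
--     ]
--     best = None
--     for order, f, ox, oy in candidates:
--         form = tuple((f(x, y)[0] - ox, f(x, y)[1] - oy) for x, y in order)
--         if best is None or form < best:
--             best = form
--     return best
-- ===== Notes on version B (the rewrite author's own statement) =====
-- stated objective: alternative
-- what changed: B sorts the point set only twice (by (x,y) and by (y,x)) and derives the sorted order of each of the 8 D4 images from those two presorted lists by run-reversal and full reversal, with translation offsets read off the bounding box computed once, instead of A's rotate/reflect loop that rebuilds, re-translates and re-sorts the point list for every symmetry.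
import Mathlib
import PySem

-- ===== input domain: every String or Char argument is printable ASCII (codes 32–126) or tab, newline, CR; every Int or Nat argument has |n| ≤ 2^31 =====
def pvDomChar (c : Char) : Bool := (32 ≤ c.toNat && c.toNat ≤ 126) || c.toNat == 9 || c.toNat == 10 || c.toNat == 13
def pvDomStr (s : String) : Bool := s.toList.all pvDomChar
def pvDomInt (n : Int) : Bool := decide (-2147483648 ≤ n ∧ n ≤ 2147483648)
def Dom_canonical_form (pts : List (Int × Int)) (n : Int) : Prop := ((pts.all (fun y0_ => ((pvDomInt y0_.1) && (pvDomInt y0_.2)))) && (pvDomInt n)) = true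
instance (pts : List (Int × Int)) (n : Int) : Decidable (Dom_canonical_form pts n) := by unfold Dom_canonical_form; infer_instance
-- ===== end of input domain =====

-- B sorts the point set only twice (by (x,y) and by (y,x)) and derives all eight D4
-- sorted orders by run-reversal / full reversal of those presorted lists, with the
-- translation offsets read off the bounding box, instead of A's loop that rebuilds,
-- re-translates and re-sorts the point list for every symmetry: alternative algorithm.

-- Python's `<` on tuples of int-pairs (and on tuples of such tuples, as used by the
-- builtin min) is lexicographic; PySem's pair order is pointwise, so this comparison
-- is hand-ported, step for step, exact on all inputs.  Used by both ports (both
-- Pythons compare forms with the builtin min / `<`).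
def pyPairLt (a b : Int × Int) : Bool := a.1 < b.1 || (a.1 == b.1 && a.2 < b.2)

def pySeqLt : List (Int × Int) → List (Int × Int) → Bool
  | [], [] => false
  | [], _ :: _ => true
  | _ :: _, [] => false
  | a :: as, b :: bs => pyPairLt a b || (a == b && pySeqLt as bs)

-- ===== PORT A =====
def normalize_polygon (pts : List (Int × Int)) : List (Int × Int) :=
  if pts = [] then []
  else
    -- pts ≠ [] here, so Python's min never raises; getD 0 is never taken
    let min_x := (PySem.List.min? (pts.map (fun p => p.1)) (fun x => x)).getD 0
    let min_y := (PySem.List.min? (pts.map (fun p => p.2)) (fun x => x)).getD 0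
    -- sorted(tuples) = stable sort by the tuple itself, i.e. by (fst, snd)
    PySem.List.sorted2 (pts.map (fun p => (p.1 - min_x, p.2 - min_y))) (fun p => p.1) (fun p => p.2)

def rotate_90 (pts : List (Int × Int)) (n : Int) : List (Int × Int) :=
  pts.map (fun p => (p.2, n - 1 - p.1))

def reflect_h (pts : List (Int × Int)) (n : Int) : List (Int × Int) :=
  pts.map (fun p => (p.1, n - 1 - p.2))

def canonical_form (pts : List (Int × Int)) (n : Int) : List (Int × Int) :=
  let st := (PySem.List.pyRange 0 4 1).foldl
    (fun (st : List (List (Int × Int)) × List (Int × Int)) _ =>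
      ((st.1 ++ [normalize_polygon st.2]) ++ [normalize_polygon (reflect_h st.2 n)],
       rotate_90 st.2 n))
    ([], pts)
  -- min(forms): builtin min, first minimal under sequence comparison; forms has 8
  -- elements, so the [] branch (where Python would raise) is never taken
  match st.1 with
  | [] => []
  | f :: fs => fs.foldl (fun m y => if pySeqLt y m then y else m) f

-- ===== PORT B =====
-- lst[j][idx] of Source B's run scanner, as a named selector
def sel_idx (idx : Nat) (q : Int × Int) : Int := if idx = 0 then q.1 else q.2

-- _rev_runs of Source B: the outer while peels one maximal run (the inner while = takeWhile),
-- reverses it, and continues on the remainder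
def rev_runs : List (Int × Int) → Nat → List (Int × Int)
  | [], _ => []
  | p :: rest, idx =>
      ((p :: rest).takeWhile (fun q => sel_idx idx q == sel_idx idx p)).reverse
        ++ rev_runs ((p :: rest).dropWhile (fun q => sel_idx idx q == sel_idx idx p)) idx
  termination_by lst _ => lst.length
  decreasing_by
    simp only [List.dropWhile_cons, beq_self_eq_true, if_pos]
    exact Nat.lt_succ_of_le (List.length_dropWhile_le _ _)

def canonical_form_alt (pts : List (Int × Int)) (n : Int) : List (Int × Int) :=
  if pts = [] then []
  else
    let xs := pts.map (fun p => p.1)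
    let ys := pts.map (fun p => p.2)
    let minx := (PySem.List.min? xs (fun x => x)).getD 0
    let maxx := (PySem.List.max? xs (fun x => x)).getD 0
    let miny := (PySem.List.min? ys (fun x => x)).getD 0
    let maxy := (PySem.List.max? ys (fun x => x)).getD 0
    let S := PySem.List.sorted2 pts (fun p => p.1) (fun p => p.2)   -- lex by (x, y)
    let T := PySem.List.sorted2 pts (fun p => p.2) (fun p => p.1)   -- lex by (y, x)
    let Sg := rev_runs S 0                                          -- x asc, y desc
    let Tg := rev_runs T 1                                          -- y asc, x desc
    let candidates : List (List (Int × Int) × (Int → Int → Int × Int) × Int × Int) :=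
      [(S,          fun x y => (x, y),   minx,  miny),
       (Sg,         fun x y => (x, -y),  minx,  -maxy),
       (Tg,         fun x y => (y, -x),  miny,  -maxx),
       (T,          fun x y => (y, x),   miny,  minx),
       (S.reverse,  fun x y => (-x, -y), -maxx, -maxy),
       (Sg.reverse, fun x y => (-x, y),  -maxx, miny),
       (Tg.reverse, fun x y => (-y, x),  -maxy, minx),
       (T.reverse,  fun x y => (-y, -x), -maxy, -maxx)]
    (candidates.foldl
      (fun (best : Option (List (Int × Int))) c =>
        let form := c.1.map (fun p => ((c.2.1 p.1 p.2).1 - c.2.2.1, (c.2.1 p.1 p.2).2 - c.2.2.2))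
        match best with
        | none => some form
        | some b => if pySeqLt form b then some form else some b)
      none).getD []

-- ===== PRECONDITION & SPEC =====
def Spec_canonical_form (pts : List (Int × Int)) (n : Int) (out : List (Int × Int)) : Prop := out = canonical_form_alt pts n
instance (pts : List (Int × Int)) (n : Int) (out : List (Int × Int)) : Decidable (Spec_canonical_form pts n out) := by unfold Spec_canonical_form; infer_instance

-- ===== CLAIM (what is proved, stated in full; the proofs are below) =====
def Claim_equal_canonical_form : Prop := ∀ (pts : List (Int × Int)) (n : Int), Dom_canonical_form pts n → Spec_canonical_form pts n (canonical_form pts n)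

-- ===== LEMMAS AND PROOFS =====

-- lexicographic orders on Int pairs, with coordinate `idx` major (idx = 0: x major)
def osel_idx (idx : Nat) (q : Int × Int) : Int := if idx = 0 then q.2 else q.1

def Rle (idx : Nat) (a b : Int × Int) : Prop :=
  sel_idx idx a < sel_idx idx b ∨ (sel_idx idx a = sel_idx idx b ∧ osel_idx idx a ≤ osel_idx idx b)

-- major ascending, minor descending (the order produced by rev_runs)
def Rle' (idx : Nat) (a b : Int × Int) : Prop :=
  sel_idx idx a < sel_idx idx b ∨ (sel_idx idx a = sel_idx idx b ∧ osel_idx idx b ≤ osel_idx idx a)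

-- insertion sort invariant: insertBy with an asymmetric transitive comparison
-- preserves "no later element is strictly before an earlier one"
lemma insertBy_pairwise {α : Type} (bf : α → α → Bool)
    (htrans : ∀ a b c, bf a b = true → bf b c = true → bf a c = true)
    (hasym : ∀ a b, bf a b = true → bf b a = false)
    (x : α) (acc : List α) (h : acc.Pairwise (fun a b => bf b a = false)) :
    (PySem.List.insertBy bf x acc).Pairwise (fun a b => bf b a = false) := by
  induction acc with
  | nil => simp [PySem.List.insertBy]
  | cons y ys ih =>
    rw [List.pairwise_cons] at h
    rw [PySem.List.insertBy]
    by_cases hxy : bf x y = true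
    · rw [if_pos hxy]
      refine List.pairwise_cons.mpr ⟨?_, List.pairwise_cons.mpr ⟨h.1, h.2⟩⟩
      intro z hz
      rcases List.mem_cons.mp hz with rfl | hz'
      · exact hasym x z hxy
      · by_contra hc
        have hzx : bf z x = true := by
          cases hzx : bf z x with
          | false => exact absurd hzx hc
          | true => rfl
        have h1 : bf z y = true := htrans z x y hzx hxy
        rw [h.1 z hz'] at h1
        exact Bool.false_ne_true h1
    · rw [if_neg hxy]
      refine List.pairwise_cons.mpr ⟨?_, ih h.2⟩
      intro z hz
      rcases (PySem.List.mem_insertBy _ _ _ _).mp hz with rfl | hz'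
      · simpa using hxy
      · exact h.1 z hz'

lemma foldl_insertBy_pairwise {α : Type} (bf : α → α → Bool)
    (htrans : ∀ a b c, bf a b = true → bf b c = true → bf a c = true)
    (hasym : ∀ a b, bf a b = true → bf b a = false) :
    ∀ (xs acc : List α), acc.Pairwise (fun a b => bf b a = false) →
      (xs.foldl (fun acc x => PySem.List.insertBy bf x acc) acc).Pairwise (fun a b => bf b a = false) := by
  intro xs
  induction xs with
  | nil => intro acc h; exact h
  | cons x t ih =>
    intro acc h
    exact ih _ (insertBy_pairwise bf htrans hasym x acc h)

-- sorted2 with Int keys, unfolded to its insertion-sort fold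
lemma sorted2_eq_foldl (xs : List (Int × Int)) (k1 k2 : (Int × Int) → Int) :
    PySem.List.sorted2 xs k1 k2 =
      xs.foldl (fun acc x => PySem.List.insertBy
        (fun a b => decide (k1 a < k1 b) || (!decide (k1 b < k1 a) && decide (k2 a < k2 b))) x acc) [] := rfl

lemma sorted2_pairwise_le (xs : List (Int × Int)) (k1 k2 : (Int × Int) → Int) :
    (PySem.List.sorted2 xs k1 k2).Pairwise
      (fun a b => k1 a < k1 b ∨ (k1 a = k1 b ∧ k2 a ≤ k2 b)) := by
  rw [sorted2_eq_foldl]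
  have h := foldl_insertBy_pairwise
    (fun a b => decide (k1 a < k1 b) || (!decide (k1 b < k1 a) && decide (k2 a < k2 b)))
    (by intro a b c hab hbc; simp at hab hbc ⊢; omega)
    (by intro a b hab; simp at hab ⊢; omega)
    xs [] List.Pairwise.nil
  refine h.imp ?_
  intro a b hab
  simp at hab
  omega
-- the sorted2 output is the unique rearrangement that is lexicographically nondecreasing
lemma sorted2_char (xs ys : List (Int × Int)) (hperm : ys.Perm xs)
    (hpw : ys.Pairwise (Rle 0)) :
    PySem.List.sorted2 xs (fun p => p.1) (fun p => p.2) = ys := by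
  have hkey : ∀ (l : List (Int × Int)), l.Pairwise (Rle 0) ↔
      l.Pairwise (fun a b => (toLex a : Lex (Int × Int)) ≤ toLex b) := by
    intro l
    constructor <;> refine fun h => h.imp ?_ <;> intro a b hab
    · rw [Prod.Lex.toLex_le_toLex]
      simpa [Rle, sel_idx, osel_idx] using hab
    · rw [Prod.Lex.toLex_le_toLex] at hab
      simpa [Rle, sel_idx, osel_idx] using hab
  have hs : (PySem.List.sorted2 xs (fun p => p.1) (fun p => p.2)).Pairwise (Rle 0) := by
    have := sorted2_pairwise_le xs (fun p => p.1) (fun p => p.2)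
    exact this.imp (fun hab => by simpa [Rle, sel_idx, osel_idx] using hab)
  exact PySem.List.eq_of_perm_of_pairwise_le_of_injective
    (fun p : Int × Int => (toLex p : Lex (Int × Int))) toLex.injective
    ((PySem.List.sorted2_perm xs _ _ false).trans hperm.symm)
    ((hkey _).mp hs) ((hkey _).mp hpw)

-- head of a dropWhile fails the predicate
lemma dropWhile_head_false {α : Type} (p : α → Bool) :
    ∀ (l : List α) (b : α) (bs : List α), l.dropWhile p = b :: bs → p b = false := by
  intro l
  induction l with
  | nil => intro b bs h; simp [List.dropWhile] at h
  | cons x xs ih =>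
    intro b bs h
    rw [List.dropWhile_cons] at h
    by_cases hx : p x = true
    · rw [if_pos hx] at h; exact ih b bs h
    · rw [if_neg hx] at h
      cases h
      simpa using hx

lemma rev_runs_perm : ∀ (l : List (Int × Int)) (idx : Nat), (rev_runs l idx).Perm l := by
  intro l idx
  induction l, idx using rev_runs.induct with
  | case1 idx => simp [rev_runs]
  | case2 p rest idx ih =>
    rw [rev_runs]
    exact (((List.reverse_perm _).append ih).trans
      (List.Perm.of_eq (List.takeWhile_append_dropWhile)))

lemma rev_runs_pairwise : ∀ (l : List (Int × Int)) (idx : Nat),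
    l.Pairwise (Rle idx) → (rev_runs l idx).Pairwise (Rle' idx) := by
  intro l idx
  induction l, idx using rev_runs.induct with
  | case1 idx => intro _; simp [rev_runs]
  | case2 p rest idx ih =>
    intro h
    rw [rev_runs]
    set pr := fun q => sel_idx idx q == sel_idx idx p with hpr
    have hsplit : (p :: rest).takeWhile pr ++ (p :: rest).dropWhile pr = p :: rest :=
      List.takeWhile_append_dropWhile
    have h' : ((p :: rest).takeWhile pr ++ (p :: rest).dropWhile pr).Pairwise (Rle idx) := by
      rw [hsplit]; exact h
    obtain ⟨h1, h2, h3⟩ := List.pairwise_append.mp h'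
    have hrun : ∀ q ∈ (p :: rest).takeWhile pr, sel_idx idx q = sel_idx idx p := by
      intro q hq
      have := List.mem_takeWhile_imp hq
      simpa [hpr] using this
    have hpmem : p ∈ (p :: rest).takeWhile pr := by
      rw [List.takeWhile_cons, if_pos (by simp [hpr])]
      exact List.mem_cons_self
    -- every element after the first run has strictly larger major coordinate
    have hcross : ∀ b ∈ (p :: rest).dropWhile pr, sel_idx idx p < sel_idx idx b := by
      intro b hb
      cases hd : (p :: rest).dropWhile pr with
      | nil => rw [hd] at hb; simp at hb
      | cons b0 bs =>
        have hb0ne : sel_idx idx b0 ≠ sel_idx idx p := by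
          have := dropWhile_head_false pr _ _ _ hd
          simpa [hpr] using this
        have hpb0 : Rle idx p b0 := h3 p hpmem b0 (by rw [hd]; exact List.mem_cons_self)
        have hpb0' : sel_idx idx p < sel_idx idx b0 := by
          rcases hpb0 with h | h
          · exact h
          · exact absurd h.1.symm hb0ne
        rw [hd] at hb
        rcases List.mem_cons.mp hb with rfl | hb'
        · exact hpb0'
        · have h2' : (b0 :: bs).Pairwise (Rle idx) := by rw [hd] at h2; exact h2
          have := (List.pairwise_cons.mp h2').1 b hb'
          rcases this with h | h
          · omega
          · omega
    refine List.pairwise_append.mpr ⟨?_, ih h2, ?_⟩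
    · rw [List.pairwise_reverse]
      refine h1.imp_of_mem ?_
      intro a b ha hb hab
      have hsa := hrun a ha
      have hsb := hrun b hb
      rcases hab with h | h
      · unfold Rle' ; omega
      · unfold Rle' ; right; exact ⟨by omega, h.2⟩
    · intro a ha b hb
      have ha' : a ∈ (p :: rest).takeWhile pr := List.mem_reverse.mp ha
      have hb' : b ∈ (p :: rest).dropWhile pr := ((rev_runs_perm _ _).mem_iff).mp hb
      have := hcross b hb'
      have := hrun a ha'
      unfold Rle'
      omega
-- B's per-map form target: normalize_polygon of the mapped points
def bForm (pts : List (Int × Int)) (f : Int → Int → Int × Int) : List (Int × Int) :=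
  normalize_polygon (pts.map (fun p => f p.1 p.2))

-- Python's min over a nonempty list as a fold from its head
def minFrom (f : List (Int × Int)) (fs : List (List (Int × Int))) : List (Int × Int) :=
  fs.foldl (fun m y => if pySeqLt y m then y else m) f

lemma A_shape (pts : List (Int × Int)) (n : Int) :
    canonical_form pts n =
      minFrom (normalize_polygon pts)
        [ normalize_polygon (reflect_h pts n),
          normalize_polygon (rotate_90 pts n),
          normalize_polygon (reflect_h (rotate_90 pts n) n),
          normalize_polygon (rotate_90 (rotate_90 pts n) n),
          normalize_polygon (reflect_h (rotate_90 (rotate_90 pts n) n) n),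
          normalize_polygon (rotate_90 (rotate_90 (rotate_90 pts n) n) n),
          normalize_polygon (reflect_h (rotate_90 (rotate_90 (rotate_90 pts n) n) n) n) ] := by
  rfl

lemma fold_some {α : Type} (g : α → List (Int × Int))
    (fs : List α) (acc : List (Int × Int)) :
    fs.foldl
      (fun best f =>
        match best with
        | none => some (g f)
        | some b => if pySeqLt (g f) b then some (g f) else some b)
      (some acc)
    = some (fs.foldl (fun m f => if pySeqLt (g f) m then g f else m) acc) := by
  induction fs generalizing acc with
  | nil => rfl
  | cons f t ih =>
    simp only [List.foldl_cons]
    by_cases h : pySeqLt (g f) acc = true <;> simp [h, ih]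

lemma fold_min_8 {α : Type} (g : α → List (Int × Int)) (c1 c2 c3 c4 c5 c6 c7 c8 : α) :
    (([c1, c2, c3, c4, c5, c6, c7, c8].foldl
      (fun (best : Option (List (Int × Int))) c =>
        match best with
        | none => some (g c)
        | some b => if pySeqLt (g c) b then some (g c) else some b)
      none).getD [])
    = minFrom (g c1) [g c2, g c3, g c4, g c5, g c6, g c7, g c8] := by
  rw [List.foldl_cons]
  rw [fold_some g]
  rfl

-- min over a shifted list shifts
lemma foldl_min_shift (t : List Int) (a d : Int) :
    (t.map (fun x => x + d)).foldl min (a + d) = t.foldl min a + d := by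
  induction t generalizing a with
  | nil => rfl
  | cons x s ih =>
    simp only [List.map_cons, List.foldl_cons]
    rw [min_add_add_right]
    exact ih (min a x)

lemma min?_shift (xs : List Int) (d : Int) :
    PySem.List.min? (xs.map (fun x => x + d)) (fun x => x)
      = (PySem.List.min? xs (fun x => x)).map (fun x => x + d) := by
  cases xs with
  | nil => rfl
  | cons x t =>
    simp [PySem.List.min?_id_cons, foldl_min_shift]

-- min of the negated list is minus the max
lemma foldl_min_neg (t : List Int) (a : Int) :
    (t.map (fun z => -z)).foldl min (-a) = -(t.foldl max a) := by
  induction t generalizing a with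
  | nil => rfl
  | cons x s ih =>
    simp only [List.map_cons, List.foldl_cons]
    rw [min_neg_neg]
    exact ih (max a x)

lemma min?_neg (xs : List Int) :
    PySem.List.min? (xs.map (fun z => -z)) (fun x => x)
      = (PySem.List.max? xs (fun x => x)).map (fun z => -z) := by
  cases xs with
  | nil => rfl
  | cons x t =>
    simp [PySem.List.min?_id_cons, PySem.List.max?_id_cons, foldl_min_neg]

lemma min_neg_getD (xs : List Int) (h : xs ≠ []) :
    (PySem.List.min? (xs.map (fun z => -z)) (fun x => x)).getD 0
      = -((PySem.List.max? xs (fun x => x)).getD 0) := by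
  rw [min?_neg]
  cases hx : PySem.List.max? xs (fun x => x) with
  | none => exact absurd ((PySem.List.max?_eq_none_iff _ _).mp hx) h
  | some m => simp

-- normalization is translation-invariant
lemma norm_translate (m : List (Int × Int)) (dx dy : Int) :
    normalize_polygon (m.map (fun q => (q.1 + dx, q.2 + dy))) = normalize_polygon m := by
  cases m with
  | nil => rfl
  | cons q t =>
    have h1 : (((q :: t).map (fun q => (q.1 + dx, q.2 + dy))).map (fun p => p.1))
        = ((q :: t).map (fun p => p.1)).map (fun x => x + dx) := by
      simp [List.map_map, Function.comp]
    have h2 : (((q :: t).map (fun q => (q.1 + dx, q.2 + dy))).map (fun p => p.2))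
        = ((q :: t).map (fun p => p.2)).map (fun x => x + dy) := by
      simp [List.map_map, Function.comp]
    unfold normalize_polygon
    rw [if_neg (by simp), if_neg (by simp)]
    rw [h1, h2, min?_shift, min?_shift]
    simp only [List.map_cons, PySem.List.min?_id_cons, Option.map_some, Option.getD_some,
      List.map_map]
    congr 1
    congr 1
    · rw [Prod.mk.injEq]; constructor <;> ring
    · apply List.map_congr_left; intro p _
      simp only [Function.comp_apply]; rw [Prod.mk.injEq]; constructor <;> ring

-- the master rewriting lemma for port A's grid maps: a constant offset does not matter
lemma norm_eq (l : List (Int × Int)) (f g : (Int × Int) → Int × Int) (dx dy : Int)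
    (H : ∀ p, f p = ((g p).1 + dx, (g p).2 + dy)) :
    normalize_polygon (l.map f) = normalize_polygon (l.map g) := by
  have h1 : l.map f = (l.map g).map (fun q => (q.1 + dx, q.2 + dy)) := by
    simp only [List.map_map]; exact List.map_congr_left (fun p _ => H p)
  rw [h1, norm_translate]

-- a B candidate list equals normalize_polygon of the mapped points
lemma cand_to_norm (pts ord : List (Int × Int)) (h : pts ≠ [])
    (f : (Int × Int) → Int × Int) (ox oy : Int)
    (hperm : ord.Perm pts)
    (hpw : (ord.map (fun p => ((f p).1 - ox, (f p).2 - oy))).Pairwise (Rle 0))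
    (hox : ((PySem.List.min? ((pts.map f).map (fun p => p.1)) (fun x => x)).getD 0) = ox)
    (hoy : ((PySem.List.min? ((pts.map f).map (fun p => p.2)) (fun x => x)).getD 0) = oy) :
    ord.map (fun p => ((f p).1 - ox, (f p).2 - oy)) = normalize_polygon (pts.map f) := by
  unfold normalize_polygon
  rw [if_neg (by simpa using h)]
  rw [hox, hoy]
  have hmm : ord.map (fun p => ((f p).1 - ox, (f p).2 - oy))
      = (ord.map f).map (fun q => (q.1 - ox, q.2 - oy)) := by rw [List.map_map]; rfl
  rw [hmm] at hpw ⊢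
  exact (sorted2_char _ _ ((hperm.map f).map _) hpw).symm
theorem canonical_form_spec : Claim_equal_canonical_form := by
  intro pts n _
  unfold Spec_canonical_form
  by_cases hp : pts = []
  · subst hp; rfl
  · have hSperm : (PySem.List.sorted2 pts (fun p => p.1) (fun p => p.2)).Perm pts := PySem.List.sorted2_perm pts _ _ false
    have hTperm : (PySem.List.sorted2 pts (fun p => p.2) (fun p => p.1)).Perm pts := PySem.List.sorted2_perm pts _ _ false
    have hSpw : (PySem.List.sorted2 pts (fun p => p.1) (fun p => p.2)).Pairwise (Rle 0) :=
      (sorted2_pairwise_le pts (fun p => p.1) (fun p => p.2)).imp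
        (fun hab => by simpa [Rle, sel_idx, osel_idx] using hab)
    have hTpw : (PySem.List.sorted2 pts (fun p => p.2) (fun p => p.1)).Pairwise (Rle 1) :=
      (sorted2_pairwise_le pts (fun p => p.2) (fun p => p.1)).imp
        (fun hab => by simpa [Rle, sel_idx, osel_idx] using hab)
    have hSg : (rev_runs (PySem.List.sorted2 pts (fun p => p.1) (fun p => p.2)) 0).Pairwise (Rle' 0) := rev_runs_pairwise _ 0 hSpw
    have hTg : (rev_runs (PySem.List.sorted2 pts (fun p => p.2) (fun p => p.1)) 1).Pairwise (Rle' 1) := rev_runs_pairwise _ 1 hTpw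
    have cand1 : (PySem.List.sorted2 pts (fun p => p.1) (fun p => p.2)).map (fun p => (((fun p => (p.1, p.2)) p).1 - ((PySem.List.min? (pts.map (fun p => p.1)) (fun x => x)).getD 0), ((fun p => (p.1, p.2)) p).2 - ((PySem.List.min? (pts.map (fun p => p.2)) (fun x => x)).getD 0))) = bForm pts (fun x y => (x, y)) :=
      cand_to_norm pts (PySem.List.sorted2 pts (fun p => p.1) (fun p => p.2)) hp (fun p => (p.1, p.2)) ((PySem.List.min? (pts.map (fun p => p.1)) (fun x => x)).getD 0) ((PySem.List.min? (pts.map (fun p => p.2)) (fun x => x)).getD 0)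
        hSperm
        (List.pairwise_map.mpr (hSpw.imp (by intro a b hab; simp [Rle, Rle', sel_idx, osel_idx] at hab ⊢; omega)))
        (by rw [List.map_map] <;> rfl)
        (by rw [List.map_map] <;> rfl)
    have cand2 : (rev_runs (PySem.List.sorted2 pts (fun p => p.1) (fun p => p.2)) 0).map (fun p => (((fun p => (p.1, -p.2)) p).1 - ((PySem.List.min? (pts.map (fun p => p.1)) (fun x => x)).getD 0), ((fun p => (p.1, -p.2)) p).2 - (-((PySem.List.max? (pts.map (fun p => p.2)) (fun x => x)).getD 0)))) = bForm pts (fun x y => (x, -y)) :=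
      cand_to_norm pts (rev_runs (PySem.List.sorted2 pts (fun p => p.1) (fun p => p.2)) 0) hp (fun p => (p.1, -p.2)) ((PySem.List.min? (pts.map (fun p => p.1)) (fun x => x)).getD 0) (-((PySem.List.max? (pts.map (fun p => p.2)) (fun x => x)).getD 0))
        ((rev_runs_perm (PySem.List.sorted2 pts (fun p => p.1) (fun p => p.2)) 0).trans hSperm)
        (List.pairwise_map.mpr (hSg.imp (by intro a b hab; simp [Rle, Rle', sel_idx, osel_idx] at hab ⊢; omega)))
        (by rw [List.map_map] <;> rfl)
        (by
      have e : (pts.map fun p => (p.1, -p.2)).map (fun p => p.2) = (pts.map (fun p => p.2)).map (fun z => -z) := by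
        rw [List.map_map, List.map_map] <;> rfl
      rw [e]
      exact min_neg_getD _ (by simpa using hp))
    have cand3 : (rev_runs (PySem.List.sorted2 pts (fun p => p.2) (fun p => p.1)) 1).map (fun p => (((fun p => (p.2, -p.1)) p).1 - ((PySem.List.min? (pts.map (fun p => p.2)) (fun x => x)).getD 0), ((fun p => (p.2, -p.1)) p).2 - (-((PySem.List.max? (pts.map (fun p => p.1)) (fun x => x)).getD 0)))) = bForm pts (fun x y => (y, -x)) :=
      cand_to_norm pts (rev_runs (PySem.List.sorted2 pts (fun p => p.2) (fun p => p.1)) 1) hp (fun p => (p.2, -p.1)) ((PySem.List.min? (pts.map (fun p => p.2)) (fun x => x)).getD 0) (-((PySem.List.max? (pts.map (fun p => p.1)) (fun x => x)).getD 0))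
        ((rev_runs_perm (PySem.List.sorted2 pts (fun p => p.2) (fun p => p.1)) 1).trans hTperm)
        (List.pairwise_map.mpr (hTg.imp (by intro a b hab; simp [Rle, Rle', sel_idx, osel_idx] at hab ⊢; omega)))
        (by rw [List.map_map] <;> rfl)
        (by
      have e : (pts.map fun p => (p.2, -p.1)).map (fun p => p.2) = (pts.map (fun p => p.1)).map (fun z => -z) := by
        rw [List.map_map, List.map_map] <;> rfl
      rw [e]
      exact min_neg_getD _ (by simpa using hp))
    have cand4 : (PySem.List.sorted2 pts (fun p => p.2) (fun p => p.1)).map (fun p => (((fun p => (p.2, p.1)) p).1 - ((PySem.List.min? (pts.map (fun p => p.2)) (fun x => x)).getD 0), ((fun p => (p.2, p.1)) p).2 - ((PySem.List.min? (pts.map (fun p => p.1)) (fun x => x)).getD 0))) = bForm pts (fun x y => (y, x)) :=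
      cand_to_norm pts (PySem.List.sorted2 pts (fun p => p.2) (fun p => p.1)) hp (fun p => (p.2, p.1)) ((PySem.List.min? (pts.map (fun p => p.2)) (fun x => x)).getD 0) ((PySem.List.min? (pts.map (fun p => p.1)) (fun x => x)).getD 0)
        hTperm
        (List.pairwise_map.mpr (hTpw.imp (by intro a b hab; simp [Rle, Rle', sel_idx, osel_idx] at hab ⊢; omega)))
        (by rw [List.map_map] <;> rfl)
        (by rw [List.map_map] <;> rfl)
    have cand5 : (PySem.List.sorted2 pts (fun p => p.1) (fun p => p.2)).reverse.map (fun p => (((fun p => (-p.1, -p.2)) p).1 - (-((PySem.List.max? (pts.map (fun p => p.1)) (fun x => x)).getD 0)), ((fun p => (-p.1, -p.2)) p).2 - (-((PySem.List.max? (pts.map (fun p => p.2)) (fun x => x)).getD 0)))) = bForm pts (fun x y => (-x, -y)) :=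
      cand_to_norm pts (PySem.List.sorted2 pts (fun p => p.1) (fun p => p.2)).reverse hp (fun p => (-p.1, -p.2)) (-((PySem.List.max? (pts.map (fun p => p.1)) (fun x => x)).getD 0)) (-((PySem.List.max? (pts.map (fun p => p.2)) (fun x => x)).getD 0))
        ((List.reverse_perm _).trans hSperm)
        (List.pairwise_map.mpr (List.pairwise_reverse.mpr (hSpw.imp (by intro a b hab; simp [Rle, Rle', sel_idx, osel_idx] at hab ⊢; omega))))
        (by
      have e : (pts.map fun p => (-p.1, -p.2)).map (fun p => p.1) = (pts.map (fun p => p.1)).map (fun z => -z) := by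
        rw [List.map_map, List.map_map] <;> rfl
      rw [e]
      exact min_neg_getD _ (by simpa using hp))
        (by
      have e : (pts.map fun p => (-p.1, -p.2)).map (fun p => p.2) = (pts.map (fun p => p.2)).map (fun z => -z) := by
        rw [List.map_map, List.map_map] <;> rfl
      rw [e]
      exact min_neg_getD _ (by simpa using hp))
    have cand6 : (rev_runs (PySem.List.sorted2 pts (fun p => p.1) (fun p => p.2)) 0).reverse.map (fun p => (((fun p => (-p.1, p.2)) p).1 - (-((PySem.List.max? (pts.map (fun p => p.1)) (fun x => x)).getD 0)), ((fun p => (-p.1, p.2)) p).2 - ((PySem.List.min? (pts.map (fun p => p.2)) (fun x => x)).getD 0))) = bForm pts (fun x y => (-x, y)) :=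
      cand_to_norm pts (rev_runs (PySem.List.sorted2 pts (fun p => p.1) (fun p => p.2)) 0).reverse hp (fun p => (-p.1, p.2)) (-((PySem.List.max? (pts.map (fun p => p.1)) (fun x => x)).getD 0)) ((PySem.List.min? (pts.map (fun p => p.2)) (fun x => x)).getD 0)
        ((List.reverse_perm _).trans ((rev_runs_perm (PySem.List.sorted2 pts (fun p => p.1) (fun p => p.2)) 0).trans hSperm))
        (List.pairwise_map.mpr (List.pairwise_reverse.mpr (hSg.imp (by intro a b hab; simp [Rle, Rle', sel_idx, osel_idx] at hab ⊢; omega))))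
        (by
      have e : (pts.map fun p => (-p.1, p.2)).map (fun p => p.1) = (pts.map (fun p => p.1)).map (fun z => -z) := by
        rw [List.map_map, List.map_map] <;> rfl
      rw [e]
      exact min_neg_getD _ (by simpa using hp))
        (by rw [List.map_map] <;> rfl)
    have cand7 : (rev_runs (PySem.List.sorted2 pts (fun p => p.2) (fun p => p.1)) 1).reverse.map (fun p => (((fun p => (-p.2, p.1)) p).1 - (-((PySem.List.max? (pts.map (fun p => p.2)) (fun x => x)).getD 0)), ((fun p => (-p.2, p.1)) p).2 - ((PySem.List.min? (pts.map (fun p => p.1)) (fun x => x)).getD 0))) = bForm pts (fun x y => (-y, x)) :=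
      cand_to_norm pts (rev_runs (PySem.List.sorted2 pts (fun p => p.2) (fun p => p.1)) 1).reverse hp (fun p => (-p.2, p.1)) (-((PySem.List.max? (pts.map (fun p => p.2)) (fun x => x)).getD 0)) ((PySem.List.min? (pts.map (fun p => p.1)) (fun x => x)).getD 0)
        ((List.reverse_perm _).trans ((rev_runs_perm (PySem.List.sorted2 pts (fun p => p.2) (fun p => p.1)) 1).trans hTperm))
        (List.pairwise_map.mpr (List.pairwise_reverse.mpr (hTg.imp (by intro a b hab; simp [Rle, Rle', sel_idx, osel_idx] at hab ⊢; omega))))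
        (by
      have e : (pts.map fun p => (-p.2, p.1)).map (fun p => p.1) = (pts.map (fun p => p.2)).map (fun z => -z) := by
        rw [List.map_map, List.map_map] <;> rfl
      rw [e]
      exact min_neg_getD _ (by simpa using hp))
        (by rw [List.map_map] <;> rfl)
    have cand8 : (PySem.List.sorted2 pts (fun p => p.2) (fun p => p.1)).reverse.map (fun p => (((fun p => (-p.2, -p.1)) p).1 - (-((PySem.List.max? (pts.map (fun p => p.2)) (fun x => x)).getD 0)), ((fun p => (-p.2, -p.1)) p).2 - (-((PySem.List.max? (pts.map (fun p => p.1)) (fun x => x)).getD 0)))) = bForm pts (fun x y => (-y, -x)) :=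
      cand_to_norm pts (PySem.List.sorted2 pts (fun p => p.2) (fun p => p.1)).reverse hp (fun p => (-p.2, -p.1)) (-((PySem.List.max? (pts.map (fun p => p.2)) (fun x => x)).getD 0)) (-((PySem.List.max? (pts.map (fun p => p.1)) (fun x => x)).getD 0))
        ((List.reverse_perm _).trans hTperm)
        (List.pairwise_map.mpr (List.pairwise_reverse.mpr (hTpw.imp (by intro a b hab; simp [Rle, Rle', sel_idx, osel_idx] at hab ⊢; omega))))
        (by
      have e : (pts.map fun p => (-p.2, -p.1)).map (fun p => p.1) = (pts.map (fun p => p.2)).map (fun z => -z) := by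
        rw [List.map_map, List.map_map] <;> rfl
      rw [e]
      exact min_neg_getD _ (by simpa using hp))
        (by
      have e : (pts.map fun p => (-p.2, -p.1)).map (fun p => p.2) = (pts.map (fun p => p.1)).map (fun z => -z) := by
        rw [List.map_map, List.map_map] <;> rfl
      rw [e]
      exact min_neg_getD _ (by simpa using hp))
    have e0 : normalize_polygon pts = bForm pts (fun x y => (x, y)) := by
      unfold bForm; congr 1; simp
    have e1 : normalize_polygon (reflect_h pts n) = bForm pts (fun x y => (x, -y)) := by
      unfold bForm reflect_h
      exact norm_eq pts _ _ 0 (n - 1) (fun p => by rw [Prod.mk.injEq]; constructor <;> ring)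
    have e2 : normalize_polygon (rotate_90 pts n) = bForm pts (fun x y => (y, -x)) := by
      unfold bForm rotate_90
      exact norm_eq pts _ _ 0 (n - 1) (fun p => by rw [Prod.mk.injEq]; constructor <;> ring)
    have e3 : normalize_polygon (reflect_h (rotate_90 pts n) n) = bForm pts (fun x y => (y, x)) := by
      unfold bForm reflect_h rotate_90
      rw [List.map_map]
      exact norm_eq pts _ _ 0 0 (fun p => by simp only [Function.comp_apply]; rw [Prod.mk.injEq]; constructor <;> ring)
    have e4 : normalize_polygon (rotate_90 (rotate_90 pts n) n) = bForm pts (fun x y => (-x, -y)) := by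
      unfold bForm rotate_90
      rw [List.map_map]
      exact norm_eq pts _ _ (n - 1) (n - 1) (fun p => by simp only [Function.comp_apply]; rw [Prod.mk.injEq]; constructor <;> ring)
    have e5 : normalize_polygon (reflect_h (rotate_90 (rotate_90 pts n) n) n) = bForm pts (fun x y => (-x, y)) := by
      unfold bForm reflect_h rotate_90
      rw [List.map_map, List.map_map]
      exact norm_eq pts _ _ (n - 1) 0 (fun p => by simp only [Function.comp_apply]; rw [Prod.mk.injEq]; constructor <;> ring)
    have e6 : normalize_polygon (rotate_90 (rotate_90 (rotate_90 pts n) n) n) = bForm pts (fun x y => (-y, x)) := by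
      unfold bForm rotate_90
      rw [List.map_map, List.map_map]
      exact norm_eq pts _ _ (n - 1) 0 (fun p => by simp only [Function.comp_apply]; rw [Prod.mk.injEq]; constructor <;> ring)
    have e7 : normalize_polygon (reflect_h (rotate_90 (rotate_90 (rotate_90 pts n) n) n) n) = bForm pts (fun x y => (-y, -x)) := by
      unfold bForm reflect_h rotate_90
      rw [List.map_map, List.map_map, List.map_map]
      exact norm_eq pts _ _ (n - 1) (n - 1) (fun p => by simp only [Function.comp_apply]; rw [Prod.mk.injEq]; constructor <;> ring)
    rw [A_shape, e0, e1, e2, e3, e4, e5, e6, e7]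
    rw [← cand1, ← cand2, ← cand3, ← cand4, ← cand5, ← cand6, ← cand7, ← cand8]
    unfold canonical_form_alt
    rw [if_neg hp]
    exact (fold_min_8 (fun c : List (Int × Int) × (Int → Int → Int × Int) × Int × Int =>
      c.1.map (fun p => ((c.2.1 p.1 p.2).1 - c.2.2.1, (c.2.1 p.1 p.2).2 - c.2.2.2)))
      ((PySem.List.sorted2 pts (fun p => p.1) (fun p => p.2)), fun x y => (x, y), ((PySem.List.min? (pts.map (fun p => p.1)) (fun x => x)).getD 0), ((PySem.List.min? (pts.map (fun p => p.2)) (fun x => x)).getD 0))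
      ((rev_runs (PySem.List.sorted2 pts (fun p => p.1) (fun p => p.2)) 0), fun x y => (x, -y), ((PySem.List.min? (pts.map (fun p => p.1)) (fun x => x)).getD 0), (-((PySem.List.max? (pts.map (fun p => p.2)) (fun x => x)).getD 0)))
      ((rev_runs (PySem.List.sorted2 pts (fun p => p.2) (fun p => p.1)) 1), fun x y => (y, -x), ((PySem.List.min? (pts.map (fun p => p.2)) (fun x => x)).getD 0), (-((PySem.List.max? (pts.map (fun p => p.1)) (fun x => x)).getD 0)))
      ((PySem.List.sorted2 pts (fun p => p.2) (fun p => p.1)), fun x y => (y, x), ((PySem.List.min? (pts.map (fun p => p.2)) (fun x => x)).getD 0), ((PySem.List.min? (pts.map (fun p => p.1)) (fun x => x)).getD 0))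
      ((PySem.List.sorted2 pts (fun p => p.1) (fun p => p.2)).reverse, fun x y => (-x, -y), (-((PySem.List.max? (pts.map (fun p => p.1)) (fun x => x)).getD 0)), (-((PySem.List.max? (pts.map (fun p => p.2)) (fun x => x)).getD 0)))
      ((rev_runs (PySem.List.sorted2 pts (fun p => p.1) (fun p => p.2)) 0).reverse, fun x y => (-x, y), (-((PySem.List.max? (pts.map (fun p => p.1)) (fun x => x)).getD 0)), ((PySem.List.min? (pts.map (fun p => p.2)) (fun x => x)).getD 0))
      ((rev_runs (PySem.List.sorted2 pts (fun p => p.2) (fun p => p.1)) 1).reverse, fun x y => (-y, x), (-((PySem.List.max? (pts.map (fun p => p.2)) (fun x => x)).getD 0)), ((PySem.List.min? (pts.map (fun p => p.1)) (fun x => x)).getD 0))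
      ((PySem.List.sorted2 pts (fun p => p.2) (fun p => p.1)).reverse, fun x y => (-y, -x), (-((PySem.List.max? (pts.map (fun p => p.2)) (fun x => x)).getD 0)), (-((PySem.List.max? (pts.map (fun p => p.1)) (fun x => x)).getD 0)))).symm
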